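-- pv_equiv track=rewrite | github.com/avinash-mall/rag-pgvector | semantic/chunking.py | merge_small_clusters
-- ===== SOURCE A (Python) =====
-- def merge_small_clusters(clusters, sentences, min_cluster_size=50):
--     new_clusters = []
--     current_cluster = []
--
--     for cluster in clusters:
--         cluster_text = ' '.join([sentences[i] for i in cluster if i < len(sentences)])
--         if len(cluster_text) < min_cluster_size:
--             current_cluster.extend(cluster)
--         else:
--             if current_cluster:
--                 new_clusters.append(current_cluster)
--                 current_cluster = []
--             new_clusters.append(cluster)
--
--     if current_cluster:
--         new_clusters.append(current_cluster)
--
--     return new_clusters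
-- ===== SOURCE B (Python) =====
-- def merge_small_clusters(clusters, sentences, min_cluster_size=50):
--     def is_small(cluster):
--         return len(' '.join(sentences[i] for i in cluster if i < len(sentences))) < min_cluster_size
--
--     keys = [is_small(c) for c in clusters]
--     out = []
--     n = len(clusters)
--     i = 0
--     while i < n:
--         j = i
--         while j < n and keys[j] == keys[i]:
--             j += 1
--         if keys[i]:
--             merged = [x for c in clusters[i:j] for x in c]
--             if merged:
--                 out.append(merged)
--         else:
--             out.extend(clusters[i:j])
--         i = j
--     return out
-- ===== Notes on version B (the rewrite author's own statement) =====
-- stated objective: alternative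
-- what changed: B first computes the small/large key of every cluster, then partitions the list into maximal runs of equal key with a two-pointer scan, flattening each small run into one cluster, instead of A's single stateful pass with a pending accumulator.
import Mathlib
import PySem

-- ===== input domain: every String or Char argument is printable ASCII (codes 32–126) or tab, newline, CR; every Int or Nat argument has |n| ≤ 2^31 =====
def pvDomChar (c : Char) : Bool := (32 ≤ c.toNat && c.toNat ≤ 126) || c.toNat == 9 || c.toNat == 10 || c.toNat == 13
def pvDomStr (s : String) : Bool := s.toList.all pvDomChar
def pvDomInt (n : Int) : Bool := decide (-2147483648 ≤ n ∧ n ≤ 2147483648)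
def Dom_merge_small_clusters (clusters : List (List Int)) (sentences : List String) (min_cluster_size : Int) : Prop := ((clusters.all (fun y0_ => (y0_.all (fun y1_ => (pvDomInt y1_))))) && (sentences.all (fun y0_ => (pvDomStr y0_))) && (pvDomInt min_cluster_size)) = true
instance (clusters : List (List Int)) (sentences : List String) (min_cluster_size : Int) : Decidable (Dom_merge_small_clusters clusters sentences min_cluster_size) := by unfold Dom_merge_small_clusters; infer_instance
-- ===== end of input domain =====

-- B replaces A's single stateful pass (pending-accumulator loop) by a key-then-run
-- partition: compute each cluster's small/large key, cut the list into maximal runs of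
-- equal key, flatten each small run into one cluster; same cost, different decomposition.

-- ===== PORT A =====
-- ' '.join([sentences[i] for i in cluster if i < len(sentences)]); sentences[i] uses
-- Python negative-index wraparound (pyGet?; .getD "" unreachable under Pre_).
def pvClusterText (sentences : List String) (cluster : List Int) : String :=
  PySem.Str.join " "
    ((cluster.filter (fun i => i < (sentences.length : Int))).map
      (fun i => (PySem.List.pyGet? sentences i).getD ""))

def merge_small_clusters (clusters : List (List Int)) (sentences : List String) (min_cluster_size : Int) : List (List Int) :=
  let st := clusters.foldl
    (fun (st : List (List Int) × List Int) cluster =>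
      let cluster_text := pvClusterText sentences cluster
      if PySem.Str.len cluster_text < min_cluster_size then
        (st.1, st.2 ++ cluster)
      else
        ((st.1 ++ (if st.2 = [] then [] else [st.2])) ++ [cluster], []))
    ([], [])
  st.1 ++ (if st.2 = [] then [] else [st.2])

-- ===== PORT B =====
-- is_small(cluster) from Source B (same join expression as A's cluster_text)
def pvIsSmall (sentences : List String) (min_cluster_size : Int) (cluster : List Int) : Bool :=
  PySem.Str.len (PySem.Str.join " "
    ((cluster.filter (fun i => i < (sentences.length : Int))).map
      (fun i => (PySem.List.pyGet? sentences i).getD ""))) < min_cluster_size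

-- Source B's outer while loop over the keyed clusters; the inner `while j < n and keys[j] == keys[i]`
-- two-pointer advance is the takeWhile/dropWhile split of the remaining keyed list.
def pvScan : List (Bool × List Int) → List (List Int)
  | [] => []
  | (k, c) :: rest =>
    let run := c :: (rest.takeWhile (fun p => p.1 == k)).map Prod.snd
    let rest' := rest.dropWhile (fun p => p.1 == k)
    (if k then (let merged := run.flatten; if merged = [] then [] else [merged]) else run)
      ++ pvScan rest'
  termination_by l => l.length
  decreasing_by
    have := List.length_dropWhile_le (fun p => p.1 == k) rest
    simp only [List.length_cons]; omega

def merge_small_clusters_alt (clusters : List (List Int)) (sentences : List String) (min_cluster_size : Int) : List (List Int) :=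
  pvScan (clusters.map (fun c => (pvIsSmall sentences min_cluster_size c, c)))

-- ===== PRECONDITION & SPEC =====
-- Pre_ excludes exactly the inputs on which Python A raises IndexError: a cluster index i with
-- i < -len(sentences) (negative wraparound past the front; i ≥ len(sentences) is filtered out).
-- Python B raises there too.
def Pre_merge_small_clusters (clusters : List (List Int)) (sentences : List String) (min_cluster_size : Int) : Prop :=
  ∀ c ∈ clusters, ∀ i ∈ c, -(sentences.length : Int) ≤ i
instance (clusters : List (List Int)) (sentences : List String) (min_cluster_size : Int) : Decidable (Pre_merge_small_clusters clusters sentences min_cluster_size) := by unfold Pre_merge_small_clusters; infer_instance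

def pvWitness_merge_small_clusters : List (List Int) × List String × Int :=
  ([[0], [1], [0, 1]], ["hi", "a much longer sentence than the threshold here"], 10)

def Spec_merge_small_clusters (clusters : List (List Int)) (sentences : List String) (min_cluster_size : Int) (out : List (List Int)) : Prop := out = merge_small_clusters_alt clusters sentences min_cluster_size
instance (clusters : List (List Int)) (sentences : List String) (min_cluster_size : Int) (out : List (List Int)) : Decidable (Spec_merge_small_clusters clusters sentences min_cluster_size out) := by unfold Spec_merge_small_clusters; infer_instance

-- ===== CLAIM (what is proved, stated in full; the proofs are below) =====
def Claim_equal_merge_small_clusters : Prop := ∀ (clusters : List (List Int)) (sentences : List String) (min_cluster_size : Int), Dom_merge_small_clusters clusters sentences min_cluster_size → Pre_merge_small_clusters clusters sentences min_cluster_size → Spec_merge_small_clusters clusters sentences min_cluster_size (merge_small_clusters clusters sentences min_cluster_size)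

-- ===== LEMMAS AND PROOFS =====

-- A's loop, rephrased: output of the rest of the loop given the pending accumulator `cur`.
def pvGo (sentences : List String) (m : Int) (cur : List Int) : List (List Int) → List (List Int)
  | [] => if cur = [] then [] else [cur]
  | c :: cs =>
    if pvIsSmall sentences m c then pvGo sentences m (cur ++ c) cs
    else (if cur = [] then [] else [cur]) ++ c :: pvGo sentences m [] cs

theorem pvGo_small_run (sentences : List String) (m : Int) (s : List (List Int))
    (hs : ∀ x ∈ s, pvIsSmall sentences m x = true) :
    ∀ (cur : List Int) (t : List (List Int)),
      pvGo sentences m cur (s ++ t) = pvGo sentences m (cur ++ s.flatten) t := by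
  induction s with
  | nil => intro cur t; simp
  | cons x s ih =>
    intro cur t
    have hx : pvIsSmall sentences m x = true := hs x (by simp)
    simp only [List.cons_append, pvGo, hx, if_pos]
    rw [ih (fun y hy => hs y (by simp [hy]))]
    simp [List.append_assoc]

theorem pvGo_large_run (sentences : List String) (m : Int) (s : List (List Int))
    (hs : ∀ x ∈ s, pvIsSmall sentences m x = false) :
    ∀ (t : List (List Int)),
      pvGo sentences m [] (s ++ t) = s ++ pvGo sentences m [] t := by
  induction s with
  | nil => intro t; simp
  | cons x s ih =>
    intro t
    have hx := hs x (by simp)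
    simp only [List.cons_append, pvGo, hx]
    rw [ih (fun y hy => hs y (by simp [hy]))]
    simp

theorem pvGo_flush (sentences : List String) (m : Int) (p : List Int) (t : List (List Int))
    (ht : t = [] ∨ ∃ d ds, t = d :: ds ∧ pvIsSmall sentences m d = false) :
    pvGo sentences m p t = (if p = [] then [] else [p]) ++ pvGo sentences m [] t := by
  rcases ht with rfl | ⟨d, ds, rfl, hd⟩
  · simp [pvGo]
  · simp [pvGo, hd]

theorem pvGo_eq_scan (sentences : List String) (m : Int) :
    ∀ (n : ℕ) (cs : List (List Int)), cs.length ≤ n →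
      pvGo sentences m [] cs = pvScan (cs.map (fun c => (pvIsSmall sentences m c, c))) := by
  intro n
  induction n with
  | zero =>
    intro cs h
    have : cs = [] := List.eq_nil_of_length_eq_zero (Nat.le_zero.mp h)
    subst this; simp [pvGo, pvScan]
  | succ n ih =>
    intro cs h
    match cs with
    | [] => simp [pvGo, pvScan]
    | c :: rest =>
      set k := pvIsSmall sentences m c with hk
      set s := rest.takeWhile (fun x => pvIsSmall sentences m x == k) with hs
      set t := rest.dropWhile (fun x => pvIsSmall sentences m x == k) with hts
      have hrest : s ++ t = rest := List.takeWhile_append_dropWhile ..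
      have hsmall : ∀ x ∈ s, pvIsSmall sentences m x = k := by
        intro x hx
        simpa using List.mem_takeWhile_imp hx
      have htlen : t.length ≤ n := by
        have h1 : t.length ≤ rest.length := List.length_dropWhile_le _ _
        simp only [List.length_cons] at h
        omega
      -- head of t (if any) has key ≠ k
      have hthead : t = [] ∨ ∃ d ds, t = d :: ds ∧ (pvIsSmall sentences m d == k) = false := by
        match ht : t with
        | [] => exact Or.inl rfl
        | d :: ds =>
          refine Or.inr ⟨d, ds, rfl, ?_⟩
          have h0 := List.head?_dropWhile_not (fun x => pvIsSmall sentences m x == k) rest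
          rw [← hts] at h0
          simpa using h0
      -- RHS: unfold pvScan once
      have hscan : pvScan ((c :: rest).map (fun c => (pvIsSmall sentences m c, c)))
          = (if k then (let merged := (c :: s).flatten; if merged = [] then [] else [merged])
             else (c :: s))
            ++ pvScan (t.map (fun c => (pvIsSmall sentences m c, c))) := by
        rw [List.map_cons, pvScan]
        have h1 : (rest.map (fun c => (pvIsSmall sentences m c, c))).takeWhile
            (fun p => p.1 == k) = s.map (fun c => (pvIsSmall sentences m c, c)) := by
          rw [List.takeWhile_map, hs]; rfl
        have h2 : (rest.map (fun c => (pvIsSmall sentences m c, c))).dropWhile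
            (fun p => p.1 == k) = t.map (fun c => (pvIsSmall sentences m c, c)) := by
          rw [List.dropWhile_map, hts]; rfl
        rw [h1, h2]
        simp [List.map_map, Function.comp_def, ← hk]
      rw [hscan, ← ih t htlen]
      -- LHS
      rcases hkk : k with _ | _
      · -- large head: run c :: s all large
        have hc : pvIsSmall sentences m c = false := by rw [← hk]; exact hkk
        have hsf : ∀ x ∈ s, pvIsSmall sentences m x = false := by
          intro x hx; rw [hsmall x hx, hkk]
        simp only [pvGo, hc, Bool.false_eq_true, if_false, List.nil_append]
        rw [← hrest, pvGo_large_run sentences m s hsf]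
        simp
      · -- small head
        have hc : pvIsSmall sentences m c = true := by rw [← hk]; exact hkk
        have hsf : ∀ x ∈ s, pvIsSmall sentences m x = true := by
          intro x hx; rw [hsmall x hx, hkk]
        simp only [pvGo, hc, if_pos, List.nil_append]
        rw [← hrest, pvGo_small_run sentences m s hsf]
        have hflush := pvGo_flush sentences m (c ++ s.flatten) t (by
          rcases hthead with h0 | ⟨d, ds, hdds, hdk⟩
          · exact Or.inl h0
          · refine Or.inr ⟨d, ds, hdds, ?_⟩
            rw [hkk] at hdk; simpa using hdk)
        rw [hflush]
        simp [List.flatten_cons]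
  termination_by n => n

theorem pvA_eq_go (sentences : List String) (m : Int) :
    ∀ (cs : List (List Int)) (new : List (List Int)) (cur : List Int),
      (let st := cs.foldl
        (fun (st : List (List Int) × List Int) cluster =>
          if PySem.Str.len (pvClusterText sentences cluster) < m then
            (st.1, st.2 ++ cluster)
          else
            ((st.1 ++ (if st.2 = [] then [] else [st.2])) ++ [cluster], []))
        (new, cur)
       st.1 ++ (if st.2 = [] then [] else [st.2]))
      = new ++ pvGo sentences m cur cs := by
  intro cs
  induction cs with
  | nil => intro new cur; simp [pvGo]
  | cons c cs ih =>
    intro new cur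
    simp only [List.foldl_cons]
    by_cases hsm : PySem.Str.len (pvClusterText sentences c) < m
    · have hb : pvIsSmall sentences m c = true := by
        simp [pvIsSmall, pvClusterText] at *; exact hsm
      simp only [if_pos hsm]
      rw [ih]
      simp [pvGo, hb]
    · have hb : pvIsSmall sentences m c = false := by
        simp [pvIsSmall, pvClusterText] at *; omega
      simp only [if_neg hsm]
      rw [ih]
      simp [pvGo, hb, List.append_assoc]

-- ===== VERDICT (by name: the statement is the Claim_ definition above) =====
theorem merge_small_clusters_spec : Claim_equal_merge_small_clusters := by
  intro clusters sentences m _ _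
  show merge_small_clusters clusters sentences m = merge_small_clusters_alt clusters sentences m
  rw [merge_small_clusters_alt, ← pvGo_eq_scan sentences m clusters.length clusters le_rfl]
  have := pvA_eq_go sentences m clusters [] []
  simpa [merge_small_clusters] using this
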